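-- pv_equiv track=rewrite | github.com/philipwilsonTHG/psh | psh/expansion/extglob.py | _split_pattern_list
-- ===== SOURCE A (Python) =====
-- from typing import List, Optional
--
-- def _split_pattern_list(inner: str) -> List[str]:
--     """Split an extglob inner pattern on '|' respecting nested parens."""
--     parts = []
--     current = []
--     depth = 0
--     i = 0
--     while i < len(inner):
--         ch = inner[i]
--         if ch == '\\' and i + 1 < len(inner):
--             current.append(ch)
--             current.append(inner[i + 1])
--             i += 2
--             continue
--         if ch == '\x00' and i + 1 < len(inner):
--             current.append(ch)
--             current.append(inner[i + 1])
--             i += 2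
--             continue
--         if ch == '(':
--             depth += 1
--             current.append(ch)
--         elif ch == ')':
--             depth -= 1
--             current.append(ch)
--         elif ch == '|' and depth == 0:
--             parts.append(''.join(current))
--             current = []
--         else:
--             current.append(ch)
--         i += 1
--     parts.append(''.join(current))
--     return parts
-- ===== SOURCE B (Python) =====
-- from typing import List
--
-- def _split_pattern_list(inner: str) -> List[str]:
--     """Split an extglob inner pattern on '|' respecting nested parens."""
--     n = len(inner)
--     bounds = []
--     depth = 0
--     i = 0
--     while i < n:
--         ch = inner[i]
--         if (ch == '\\' or ch == '\x00') and i + 1 < n: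
--             i += 2
--             continue
--         if ch == '(':
--             depth += 1
--         elif ch == ')':
--             depth -= 1
--         elif ch == '|' and depth == 0:
--             bounds.append(i)
--         i += 1
--     parts = []
--     start = 0
--     for b in bounds:
--         parts.append(inner[start:b])
--         start = b + 1
--     parts.append(inner[start:])
--     return parts
-- ===== Notes on version B (the rewrite author's own statement) =====
-- stated objective: alternative
-- what changed: B records only the indices of top-level separator characters in one scan and then builds the parts by slicing the input between consecutive boundaries, instead of accumulating every kept character into a buffer and joining it per part.
import Mathlib
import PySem

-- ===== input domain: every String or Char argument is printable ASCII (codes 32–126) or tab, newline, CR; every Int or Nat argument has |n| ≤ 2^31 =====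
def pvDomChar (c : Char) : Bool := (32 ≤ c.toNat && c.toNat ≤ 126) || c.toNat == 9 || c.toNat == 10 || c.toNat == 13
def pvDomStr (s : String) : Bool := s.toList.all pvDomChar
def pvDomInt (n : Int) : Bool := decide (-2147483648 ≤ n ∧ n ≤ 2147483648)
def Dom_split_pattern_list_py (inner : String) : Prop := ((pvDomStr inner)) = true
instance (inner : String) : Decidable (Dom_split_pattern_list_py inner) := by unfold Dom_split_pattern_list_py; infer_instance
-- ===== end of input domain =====

-- B replaces A's per-character output buffer with a boundary-index scan plus slicing; objective: alternative decomposition, same O(n) cost.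

-- ===== PORT A =====
-- A's while loop over the string: structural recursion on the remaining characters,
-- state (current buffer, depth, parts); the 'i + 1 < len(inner)' guards become the
-- two-element match on the remaining list.
def loopA : List Char → List Char → Int → List String → List String
  | [], cur, _, parts => parts ++ [String.mk cur]
  | ch :: rest, cur, depth, parts =>
    match rest with
    | nx :: rest' =>
      if ch = '\\' then loopA rest' (cur ++ [ch, nx]) depth parts
      else if ch = '\x00' then loopA rest' (cur ++ [ch, nx]) depth parts
      else if ch = '(' then loopA (nx :: rest') (cur ++ [ch]) (depth + 1) parts
      else if ch = ')' then loopA (nx :: rest') (cur ++ [ch]) (depth - 1) parts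
      else if ch = '|' ∧ depth = 0 then loopA (nx :: rest') [] depth (parts ++ [String.mk cur])
      else loopA (nx :: rest') (cur ++ [ch]) depth parts
    | [] =>
      if ch = '(' then loopA [] (cur ++ [ch]) (depth + 1) parts
      else if ch = ')' then loopA [] (cur ++ [ch]) (depth - 1) parts
      else if ch = '|' ∧ depth = 0 then loopA [] [] depth (parts ++ [String.mk cur])
      else loopA [] (cur ++ [ch]) depth parts

def split_pattern_list_py (inner : String) : List String :=
  loopA inner.toList [] 0 []

-- ===== PORT B =====
-- B's first pass: collect the absolute indices of top-level '|' (cons = append in order).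
def loopB : List Char → Nat → Int → List Nat
  | [], _, _ => []
  | ch :: rest, i, depth =>
    match rest with
    | nx :: rest' =>
      if ch = '\\' ∨ ch = '\x00' then loopB rest' (i + 2) depth
      else if ch = '(' then loopB (nx :: rest') (i + 1) (depth + 1)
      else if ch = ')' then loopB (nx :: rest') (i + 1) (depth - 1)
      else if ch = '|' ∧ depth = 0 then i :: loopB (nx :: rest') (i + 1) depth
      else loopB (nx :: rest') (i + 1) depth
    | [] =>
      if ch = '(' then loopB [] (i + 1) (depth + 1)
      else if ch = ')' then loopB [] (i + 1) (depth - 1)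
      else if ch = '|' ∧ depth = 0 then i :: loopB [] (i + 1) depth
      else loopB [] (i + 1) depth

-- B's second pass: inner[start:b] with 0 ≤ start ≤ b natural numbers is exactly
-- take (b - start) ∘ drop start; inner[start:] is drop start.
def buildParts (l : List Char) : Nat → List Nat → List String
  | start, [] => [String.mk (l.drop start)]
  | start, b :: bs => String.mk ((l.drop start).take (b - start)) :: buildParts l (b + 1) bs

def split_pattern_list_py_alt (inner : String) : List String :=
  buildParts inner.toList 0 (loopB inner.toList 0 0)

-- ===== PRECONDITION & SPEC =====
def Spec_split_pattern_list_py (inner : String) (out : List String) : Prop := out = split_pattern_list_py_alt inner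
instance (inner : String) (out : List String) : Decidable (Spec_split_pattern_list_py inner out) := by unfold Spec_split_pattern_list_py; infer_instance

-- ===== CLAIM (what is proved, stated in full; the proofs are below) =====
def Claim_equal_split_pattern_list_py : Prop := ∀ (inner : String), Dom_split_pattern_list_py inner → Spec_split_pattern_list_py inner (split_pattern_list_py inner)

-- ===== LEMMAS AND PROOFS =====

-- reference splitter both ports are reduced to
def consHd (xs : List Char) : List (List Char) → List (List Char)
  | [] => [xs]
  | p :: ps => (xs ++ p) :: ps

def splitB : List Char → Int → List (List Char)
  | [], _ => [[]]
  | ch :: rest, depth =>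
    match rest with
    | nx :: rest' =>
      if ch = '\\' ∨ ch = '\x00' then consHd [ch, nx] (splitB rest' depth)
      else if ch = '(' then consHd [ch] (splitB (nx :: rest') (depth + 1))
      else if ch = ')' then consHd [ch] (splitB (nx :: rest') (depth - 1))
      else if ch = '|' ∧ depth = 0 then [] :: splitB (nx :: rest') depth
      else consHd [ch] (splitB (nx :: rest') depth)
    | [] =>
      if ch = '(' then consHd [ch] (splitB [] (depth + 1))
      else if ch = ')' then consHd [ch] (splitB [] (depth - 1))
      else if ch = '|' ∧ depth = 0 then [] :: splitB [] depth
      else consHd [ch] (splitB [] depth)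

theorem consHd_ne_nil (xs : List Char) (pps : List (List Char)) : consHd xs pps ≠ [] := by
  cases pps <;> simp [consHd]

theorem splitB_ne_nil (l : List Char) (d : Int) : splitB l d ≠ [] := by
  cases l with
  | nil => simp [splitB]
  | cons ch rest =>
    cases rest <;> · simp only [splitB]; split_ifs <;> simp [consHd_ne_nil]

theorem consHd_assoc (a b : List Char) (pps : List (List Char)) :
    consHd a (consHd b pps) = consHd (a ++ b) pps := by
  cases pps <;> simp [consHd]

theorem consHd_nil (pps : List (List Char)) (h : pps ≠ []) : consHd [] pps = pps := by
  cases pps with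
  | nil => exact absurd rfl h
  | cons p ps => simp [consHd]

theorem take_succ_of_drop (m : List Char) (k : Nat) (c : Char) (r : List Char)
    (h : m.drop k = c :: r) : m.take (k + 1) = m.take k ++ [c] := by
  have hk : m[k]? = some c := by
    have h2 : (m.drop k)[0]? = some c := by simp [h]
    rw [List.getElem?_drop] at h2
    simpa using h2
  simp [List.take_succ, hk]

theorem loopA_eq_aux : ∀ (n : Nat) (rest : List Char), rest.length ≤ n →
    ∀ (cur : List Char) (depth : Int) (parts : List String),
      loopA rest cur depth parts = parts ++ (consHd cur (splitB rest depth)).map String.mk := by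
  intro n
  induction n with
  | zero =>
    intro rest hlen cur depth parts
    have : rest = [] := List.eq_nil_of_length_eq_zero (Nat.le_zero.mp hlen)
    subst this
    simp [loopA, splitB, consHd]
  | succ n ih =>
    intro rest hlen cur depth parts
    match rest with
    | [] => simp [loopA, splitB, consHd]
    | [ch] =>
      simp only [loopA, splitB]
      split_ifs with h1 h2 h3 <;> simp [consHd]
    | ch :: nx :: rest' =>
      have hle2 : rest'.length ≤ n := by simp at hlen; omega
      have hle1 : (nx :: rest').length ≤ n := by simp at hlen ⊢; omega
      simp only [loopA, splitB]
      split_ifs with h1 h2 h3 h4 h5 <;> try tauto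
      · rw [ih _ hle2, consHd_assoc]
      · rw [ih _ hle2, consHd_assoc]
      · rw [ih _ hle1, consHd_assoc]
      · rw [ih _ hle1, consHd_assoc]
      · rw [ih _ hle1, consHd_nil _ (splitB_ne_nil _ _)]
        simp [consHd]
      · rw [ih _ hle1, consHd_assoc]

theorem loopA_eq (rest cur : List Char) (depth : Int) (parts : List String) :
    loopA rest cur depth parts = parts ++ (consHd cur (splitB rest depth)).map String.mk :=
  loopA_eq_aux rest.length rest le_rfl cur depth parts

theorem buildParts_eq_aux (l : List Char) : ∀ (n : Nat) (rest : List Char), rest.length ≤ n →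
    ∀ (i : Nat) (depth : Int), l.drop i = rest → ∀ j, j ≤ i →
      buildParts l j (loopB rest i depth)
        = (consHd ((l.drop j).take (i - j)) (splitB rest depth)).map String.mk := by
  intro n
  induction n with
  | zero =>
    intro rest hlen i depth hd j hj
    have : rest = [] := List.eq_nil_of_length_eq_zero (Nat.le_zero.mp hlen)
    subst this
    have hlast : (l.drop j).take (i - j) = l.drop j := by
      apply List.take_of_length_le
      have := List.drop_eq_nil_iff.mp hd
      simp; omega
    simp [buildParts, loopB, splitB, consHd, hlast]
  | succ n ih =>
    intro rest hlen i depth hd j hj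
    have hdj : (l.drop j).drop (i - j) = rest := by
      rw [List.drop_drop, show j + (i - j) = i by omega]; exact hd
    match rest with
    | [] =>
      have hlast : (l.drop j).take (i - j) = l.drop j := by
        apply List.take_of_length_le
        have := List.drop_eq_nil_iff.mp hd
        simp; omega
      simp [buildParts, loopB, splitB, consHd, hlast]
    | [ch] =>
      have hd1 : l.drop (i + 1) = [] := by rw [← List.tail_drop, hd]; rfl
      have t1 : (l.drop j).take (i - j + 1) = (l.drop j).take (i - j) ++ [ch] :=
        take_succ_of_drop _ _ _ _ hdj
      have hij : i + 1 - j = i - j + 1 := by omega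
      have hfull : l.drop j = (l.drop j).take (i - j) ++ [ch] := by
        conv_lhs => rw [← List.take_append_drop (i - j) (l.drop j)]
        rw [hdj]
      simp only [loopB, splitB]
      split_ifs with h1 h2 h3 <;>
        · simp only [buildParts]
          first
            | · conv_lhs => rw [hfull]
                simp [consHd]
            | simp [consHd, hd1]
    | ch :: nx :: rest' =>
      have hle2 : rest'.length ≤ n := by simp at hlen; omega
      have hle1 : (nx :: rest').length ≤ n := by simp at hlen ⊢; omega
      have hd1 : l.drop (i + 1) = nx :: rest' := by rw [← List.tail_drop, hd]; rfl
      have hd2 : l.drop (i + 2) = rest' := by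
        rw [show i + 2 = (i + 1) + 1 by ring, ← List.tail_drop, hd1]; rfl
      have hdj1 : (l.drop j).drop (i - j + 1) = nx :: rest' := by
        rw [← List.tail_drop, hdj]; rfl
      have t1 : (l.drop j).take (i - j + 1) = (l.drop j).take (i - j) ++ [ch] :=
        take_succ_of_drop _ _ _ _ hdj
      have t2 : (l.drop j).take (i - j + 2) = (l.drop j).take (i - j + 1) ++ [nx] :=
        take_succ_of_drop _ _ _ _ hdj1
      have hij1 : i + 1 - j = i - j + 1 := by omega
      have hij2 : i + 2 - j = i - j + 2 := by omega
      simp only [loopB, splitB]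
      split_ifs with h1 h2 h3 h4
      · rw [ih _ hle2 (i + 2) _ hd2 j (by omega), hij2, t2, t1, consHd_assoc]
        simp
      · rw [ih _ hle1 (i + 1) _ hd1 j (by omega), hij1, t1, consHd_assoc]
      · rw [ih _ hle1 (i + 1) _ hd1 j (by omega), hij1, t1, consHd_assoc]
      · rw [buildParts, ih _ hle1 (i + 1) _ hd1 (i + 1) (by omega)]
        rw [show i + 1 - (i + 1) = 0 by omega]
        rw [List.take_zero, consHd_nil _ (splitB_ne_nil _ _)]
        simp [consHd]
      · rw [ih _ hle1 (i + 1) _ hd1 j (by omega), hij1, t1, consHd_assoc]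

theorem buildParts_eq (l : List Char) (rest : List Char) (i : Nat) (depth : Int)
    (hd : l.drop i = rest) (j : Nat) (hj : j ≤ i) :
    buildParts l j (loopB rest i depth)
      = (consHd ((l.drop j).take (i - j)) (splitB rest depth)).map String.mk :=
  buildParts_eq_aux l rest.length rest le_rfl i depth hd j hj

-- ===== VERDICT (by name: the statement is the Claim_ definition above) =====
theorem split_pattern_list_py_spec : Claim_equal_split_pattern_list_py := by
  intro inner _
  unfold Spec_split_pattern_list_py split_pattern_list_py split_pattern_list_py_alt
  rw [loopA_eq, buildParts_eq inner.toList inner.toList 0 0 rfl 0 le_rfl]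
  simp
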